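-- pv_equiv track=rewrite | github.com/Likhith-Asapu/Codemix-Pun-Generation | classification/Data/calculate_pun_success.py | calulate_pun_success
-- ===== SOURCE A (Python) =====
-- def calulate_pun_success(data, startIndex, endIndex):
--     pun_count = 0
--     total_count = 0
--     for row in data:
--         if row['label'] == 1 and row['id'] >= startIndex and row['id'] < endIndex:
--             pun_count += 1
--         if row['id'] >= startIndex and row['id'] < endIndex:
--             total_count += 1
--     return pun_count, total_count
-- ===== SOURCE B (Python) =====
-- def calulate_pun_success(data, startIndex, endIndex):
--     rows = list(data)
--
--     def go(lo, hi):
--         # divide and conquer: counts over rows[lo:hi]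
--         if hi - lo == 0:
--             return (0, 0)
--         if hi - lo == 1:
--             r = rows[lo]
--             in_range = startIndex <= r['id'] < endIndex
--             return (1 if in_range and r['label'] == 1 else 0, 1 if in_range else 0)
--         mid = (lo + hi) // 2
--         p1, t1 = go(lo, mid)
--         p2, t2 = go(mid, hi)
--         return (p1 + p2, t1 + t2)
--
--     return go(0, len(rows))
-- ===== Notes on version B (the rewrite author's own statement) =====
-- stated objective: alternative
-- what changed: Replaced A's single linear loop carrying two accumulators by a divide-and-conquer recursion: split the row list in half, recursively compute (pun,total) for each half and add the pairs, classifying a single row only at the length-1 base case.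
import Mathlib
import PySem

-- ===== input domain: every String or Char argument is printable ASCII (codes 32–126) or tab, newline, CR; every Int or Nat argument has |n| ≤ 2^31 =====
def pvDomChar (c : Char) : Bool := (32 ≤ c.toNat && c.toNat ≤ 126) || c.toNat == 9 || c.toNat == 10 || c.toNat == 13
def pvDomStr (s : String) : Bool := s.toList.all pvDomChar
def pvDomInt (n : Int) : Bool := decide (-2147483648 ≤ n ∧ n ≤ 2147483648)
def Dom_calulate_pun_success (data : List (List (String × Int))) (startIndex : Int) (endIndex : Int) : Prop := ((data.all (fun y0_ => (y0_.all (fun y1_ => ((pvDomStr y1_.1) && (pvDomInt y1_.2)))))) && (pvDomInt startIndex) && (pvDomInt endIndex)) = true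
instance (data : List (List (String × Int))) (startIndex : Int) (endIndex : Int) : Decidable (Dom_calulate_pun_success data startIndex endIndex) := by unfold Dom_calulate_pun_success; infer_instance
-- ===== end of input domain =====

-- B replaces A's linear dual-accumulator loop by a divide-and-conquer recursion that
-- splits the row list in half and adds the two (pun,total) pairs (objective: alternative).

-- ===== PORT A =====
-- row[k] on an assoc-list dict: first match; exact where the key is present (Pre_ guarantees it;
-- Python raises KeyError on a missing key, excluded by Pre_, where this returns 0).
def keyGet (row : List (String × Int)) (k : String) : Int :=
  (((row.find? (fun p => p.1 == k)).map (fun p => p.2)).getD 0)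

def calulate_pun_success (data : List (List (String × Int))) (startIndex : Int) (endIndex : Int) : Int × Int :=
  data.foldl (fun st row =>
    let st1 := if keyGet row "label" = 1 ∧ keyGet row "id" ≥ startIndex ∧ keyGet row "id" < endIndex
               then (st.1 + 1, st.2) else st
    if keyGet row "id" ≥ startIndex ∧ keyGet row "id" < endIndex
    then (st1.1, st1.2 + 1) else st1) (0, 0)

-- ===== PORT B =====
-- the inner recursion go: divide-and-conquer over the sublist (Python's rows[lo:hi])
def altGo (s e : Int) : List (List (String × Int)) → Int × Int
  | [] => (0, 0)
  | [r] =>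
      (if (s ≤ keyGet r "id" ∧ keyGet r "id" < e) ∧ keyGet r "label" = 1 then 1 else 0,
       if s ≤ keyGet r "id" ∧ keyGet r "id" < e then 1 else 0)
  | r1 :: r2 :: rest =>
      let a := altGo s e ((r1 :: r2 :: rest).take ((r1 :: r2 :: rest).length / 2))
      let b := altGo s e ((r1 :: r2 :: rest).drop ((r1 :: r2 :: rest).length / 2))
      (a.1 + b.1, a.2 + b.2)
  termination_by l => l.length
  decreasing_by
    · simp only [List.length_take, List.length_cons]; omega
    · simp only [List.length_drop, List.length_cons]; omega

def calulate_pun_success_alt (data : List (List (String × Int))) (startIndex : Int) (endIndex : Int) : Int × Int :=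
  altGo startIndex endIndex data


-- ===== PRECONDITION & SPEC =====
-- Pre_ excludes inputs where Python A raises KeyError: rows missing the "label" or "id" key.
def Pre_calulate_pun_success (data : List (List (String × Int))) (startIndex : Int) (endIndex : Int) : Prop :=
  (data.all (fun row => row.any (fun p => p.1 == "label") && row.any (fun p => p.1 == "id"))) = true
instance (data : List (List (String × Int))) (startIndex : Int) (endIndex : Int) : Decidable (Pre_calulate_pun_success data startIndex endIndex) := by unfold Pre_calulate_pun_success; infer_instance

def pvWitness_calulate_pun_success : (List (List (String × Int))) × Int × Int :=
  ([[("id", 1), ("label", 1)], [("id", 2), ("label", 0)], [("id", 5), ("label", 1)]], 0, 3)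

def Spec_calulate_pun_success (data : List (List (String × Int))) (startIndex : Int) (endIndex : Int) (out : Int × Int) : Prop := out = calulate_pun_success_alt data startIndex endIndex
instance (data : List (List (String × Int))) (startIndex : Int) (endIndex : Int) (out : Int × Int) : Decidable (Spec_calulate_pun_success data startIndex endIndex out) := by unfold Spec_calulate_pun_success; infer_instance

-- ===== CLAIM (what is proved, stated in full; the proofs are below) =====
def Claim_equal_calulate_pun_success : Prop := ∀ (data : List (List (String × Int))) (startIndex : Int) (endIndex : Int), Dom_calulate_pun_success data startIndex endIndex → Pre_calulate_pun_success data startIndex endIndex → Spec_calulate_pun_success data startIndex endIndex (calulate_pun_success data startIndex endIndex)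

-- ===== LEMMAS AND PROOFS =====

-- the two per-row indicator counts, the common denominator of both ports
def punCnt (s e : Int) (l : List (List (String × Int))) : Int :=
  (l.countP (fun r => decide ((s ≤ keyGet r "id" ∧ keyGet r "id" < e) ∧ keyGet r "label" = 1)) : Int)
def totCnt (s e : Int) (l : List (List (String × Int))) : Int :=
  (l.countP (fun r => decide (s ≤ keyGet r "id" ∧ keyGet r "id" < e)) : Int)

theorem punCnt_append (s e : Int) (l₁ l₂ : List (List (String × Int))) :
    punCnt s e (l₁ ++ l₂) = punCnt s e l₁ + punCnt s e l₂ := by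
  simp [punCnt, List.countP_append]
theorem totCnt_append (s e : Int) (l₁ l₂ : List (List (String × Int))) :
    totCnt s e (l₁ ++ l₂) = totCnt s e l₁ + totCnt s e l₂ := by
  simp [totCnt, List.countP_append]

-- B's divide-and-conquer computes exactly the two indicator counts
theorem altGo_eq (s e : Int) : ∀ l, altGo s e l = (punCnt s e l, totCnt s e l) := by
  intro l
  fun_induction altGo s e l with
  | case1 => simp [punCnt, totCnt]
  | case2 r =>
      simp only [punCnt, totCnt, List.countP_cons, List.countP_nil]
      by_cases h1 : (s ≤ keyGet r "id" ∧ keyGet r "id" < e) ∧ keyGet r "label" = 1 <;>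
        by_cases h2 : s ≤ keyGet r "id" ∧ keyGet r "id" < e <;>
          simp_all
  | case3 r1 r2 rest a b ih1 ih2 =>
      have hsplit : (r1 :: r2 :: rest).take ((r1 :: r2 :: rest).length / 2)
          ++ (r1 :: r2 :: rest).drop ((r1 :: r2 :: rest).length / 2) = r1 :: r2 :: rest :=
        List.take_append_drop _ _
      have hp := punCnt_append s e ((r1 :: r2 :: rest).take ((r1 :: r2 :: rest).length / 2))
        ((r1 :: r2 :: rest).drop ((r1 :: r2 :: rest).length / 2))
      have ht := totCnt_append s e ((r1 :: r2 :: rest).take ((r1 :: r2 :: rest).length / 2))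
        ((r1 :: r2 :: rest).drop ((r1 :: r2 :: rest).length / 2))
      rw [hsplit] at hp ht
      simp only [a, b, ih1, ih2, ← hp, ← ht]

-- A's fold from any accumulator adds the two indicator counts
theorem a_fold_eq (s e : Int) (data : List (List (String × Int))) : ∀ (p t : Int),
    data.foldl (fun st row =>
      let st1 := if keyGet row "label" = 1 ∧ keyGet row "id" ≥ s ∧ keyGet row "id" < e
                 then (st.1 + 1, st.2) else st
      if keyGet row "id" ≥ s ∧ keyGet row "id" < e
      then (st1.1, st1.2 + 1) else st1) (p, t)
      = (p + punCnt s e data, t + totCnt s e data) := by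
  induction data with
  | nil => intro p t; simp [punCnt, totCnt]
  | cons row rest ih =>
    intro p t
    rw [List.foldl_cons]
    simp only [punCnt, totCnt, List.countP_cons] at *
    by_cases hid : s ≤ keyGet row "id" ∧ keyGet row "id" < e
    · have hidg : keyGet row "id" ≥ s ∧ keyGet row "id" < e := hid
      by_cases hl : keyGet row "label" = 1
      · simp only [if_pos (And.intro hl hidg), if_pos hidg]
        rw [ih]
        have : ((s ≤ keyGet row "id" ∧ keyGet row "id" < e) ∧ keyGet row "label" = 1) := ⟨hid, hl⟩
        simp_all; constructor <;> ring
      · have hnl : ¬ (keyGet row "label" = 1 ∧ keyGet row "id" ≥ s ∧ keyGet row "id" < e) :=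
          fun hc => hl hc.1
        simp only [if_neg hnl, if_pos hidg]
        rw [ih]
        have : ¬ ((s ≤ keyGet row "id" ∧ keyGet row "id" < e) ∧ keyGet row "label" = 1) :=
          fun hc => hl hc.2
        simp_all; ring
    · have hng : ¬ (keyGet row "id" ≥ s ∧ keyGet row "id" < e) := fun hc => hid ⟨hc.1, hc.2⟩
      have hnl : ¬ (keyGet row "label" = 1 ∧ keyGet row "id" ≥ s ∧ keyGet row "id" < e) :=
        fun hc => hng hc.2
      have : ¬ ((s ≤ keyGet row "id" ∧ keyGet row "id" < e) ∧ keyGet row "label" = 1) :=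
        fun hc => hid hc.1
      simp only [if_neg hnl, if_neg hng]
      rw [ih]
      simp_all

-- ===== VERDICT (by name: the statement is the Claim_ definition above) =====
theorem calulate_pun_success_spec : Claim_equal_calulate_pun_success := by
  intro data s e _ _
  unfold Spec_calulate_pun_success calulate_pun_success calulate_pun_success_alt
  rw [a_fold_eq, altGo_eq]
  simp
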